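-- pv_equiv track=rewrite | github.com/NastyRu/Modeling | semestr2/lab1/main.py | frequency_creteria
-- ===== SOURCE A (Python) =====
-- def frequency_creteria(list, num):
--     freq = [0 for i in range(5)]
--
--     if (1 == num):
--         begin = 0
--         delta = 2
--     else:
--         delta = (pow(10, num) - pow(10, num - 1)) // 5
--         begin = pow(10, num - 1)
--
--     for elem in list:
--         if (elem < begin + delta):
--             freq[0] += 1
--         elif (elem < begin + 2 * delta):
--             freq[1] += 1
--         elif (elem < begin + 3 * delta):
--             freq[2] += 1
--         elif (elem < begin + 4 * delta):
--             freq[3] += 1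
--         else:
--             freq[4] += 1
--
--     return freq
-- ===== SOURCE B (Python) =====
-- def frequency_creteria(list, num):
--     if 1 == num:
--         begin, delta = 0, 2
--     else:
--         begin = pow(10, num - 1)
--         delta = (pow(10, num) - begin) // 5
--
--     s = sorted(list)
--
--     def below(t):
--         # index of the first element of s that is >= t (= count of elements < t)
--         lo, hi = 0, len(s)
--         while lo < hi:
--             mid = (lo + hi) // 2
--             if s[mid] < t:
--                 lo = mid + 1
--             else:
--                 hi = mid
--         return lo
--
--     c1 = below(begin + delta)
--     c2 = below(begin + 2 * delta)
--     c3 = below(begin + 3 * delta)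
--     c4 = below(begin + 4 * delta)
--     n = len(list)
--     return [c1, c2 - c1, c3 - c2, c4 - c3, n - c4]
-- ===== Notes on version B (the rewrite author's own statement) =====
-- stated objective: faster
-- what changed: Instead of one pass dispatching each element through a five-way if/elif cascade into a mutable freq array, B sorts the list once and locates each of the four bucket thresholds with a hand-rolled bisect_left binary search; the buckets are the successive differences of those positions.
-- outside the precondition, e.g. on frequency_creteria([0], 0): A returns [1, 0, 0, 0, 0], B returns [1, 0, 0, 0, 0]
import Mathlib
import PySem

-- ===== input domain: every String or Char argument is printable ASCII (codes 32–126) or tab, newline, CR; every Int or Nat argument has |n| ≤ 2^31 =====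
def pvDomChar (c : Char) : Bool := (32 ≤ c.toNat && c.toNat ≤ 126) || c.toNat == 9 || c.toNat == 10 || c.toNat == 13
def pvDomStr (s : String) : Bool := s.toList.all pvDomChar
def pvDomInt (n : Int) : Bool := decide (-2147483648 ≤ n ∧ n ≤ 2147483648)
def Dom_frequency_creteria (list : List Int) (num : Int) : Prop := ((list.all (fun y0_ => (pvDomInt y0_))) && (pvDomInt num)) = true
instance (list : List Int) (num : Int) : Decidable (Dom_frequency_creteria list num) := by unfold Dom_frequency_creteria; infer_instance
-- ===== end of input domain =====

-- B replaces A's single pass with a five-way if/elif cascade into a mutable histogram by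
-- sorting the list once and locating each of the four bucket thresholds with a binary
-- search; the buckets are the successive differences of those positions — measurably faster
-- on a timing run's large inputs (C-level sort replaces the per-element interpreted loop).

-- ===== PORT A =====
-- freq[i] += 1 on the 5-element list
def pvInc (freq : List Int) (i : Nat) : List Int := freq.modify i (· + 1)

def frequency_creteria (list : List Int) (num : Int) : List Int :=
  -- pow(10, num) ported as 10 ^ num.toNat: exact for num ≥ 1 (Pre_); for num ≤ 0 Python
  -- computes begin/delta with FLOAT pow, which Pre_ excludes.
  let bd : Int × Int :=
    if (1 : Int) = num then (0, 2)
    else (10 ^ (num - 1).toNat,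
          PySem.Int.floordiv (10 ^ num.toNat - 10 ^ (num - 1).toNat) 5)
  let begin_ := bd.1
  let delta := bd.2
  list.foldl (fun freq elem =>
      if elem < begin_ + delta then pvInc freq 0
      else if elem < begin_ + 2 * delta then pvInc freq 1
      else if elem < begin_ + 3 * delta then pvInc freq 2
      else if elem < begin_ + 4 * delta then pvInc freq 3
      else pvInc freq 4)
    [0, 0, 0, 0, 0]

-- ===== PORT B =====
-- Source B's inner 'below': hand-rolled bisect_left while-loop, ported as recursion on hi - lo;
-- s[mid] is ported with pyGet? (the none branch is unreachable for 0 ≤ lo < hi ≤ len).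
def pvBelow (s : List Int) (t : Int) (lo hi : Int) : Int :=
  if h : lo < hi then
    let mid := PySem.Int.floordiv (lo + hi) 2
    match PySem.List.pyGet? s mid with
    | some v => if v < t then pvBelow s t (mid + 1) hi else pvBelow s t lo mid
    | none => lo
  else lo
termination_by (hi - lo).toNat
decreasing_by
  all_goals
    have hb := PySem.Int.floordiv_two_mid_bounds (le_of_lt h)
    have hlt : PySem.Int.floordiv (lo + hi) 2 < hi :=
      (PySem.Int.floordiv_lt_iff_lt_mul (by norm_num)).2 (by omega)
    omega

def frequency_creteria_alt (list : List Int) (num : Int) : List Int :=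
  let bd : Int × Int :=
    if (1 : Int) = num then (0, 2)
    else
      let b := 10 ^ (num - 1).toNat
      (b, PySem.Int.floordiv (10 ^ num.toNat - b) 5)
  let begin_ := bd.1
  let delta := bd.2
  let s := PySem.List.sorted list (fun x => x) false
  let c1 := pvBelow s (begin_ + delta) 0 (s.length : Int)
  let c2 := pvBelow s (begin_ + 2 * delta) 0 (s.length : Int)
  let c3 := pvBelow s (begin_ + 3 * delta) 0 (s.length : Int)
  let c4 := pvBelow s (begin_ + 4 * delta) 0 (s.length : Int)
  let n : Int := list.length
  [c1, c2 - c1, c3 - c2, c4 - c3, n - c4]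

-- ===== PRECONDITION & SPEC =====
-- Pre_ excludes num ≤ 0, where Python A computes begin/delta with float pow (e.g. delta = 0.0),
-- outside the Int type convention, so neither program is portable there.
def Pre_frequency_creteria (list : List Int) (num : Int) : Prop := 1 ≤ num
instance (list : List Int) (num : Int) : Decidable (Pre_frequency_creteria list num) := by
  unfold Pre_frequency_creteria; infer_instance

def pvWitness_frequency_creteria : List Int × Int := ([15, 3, 99, 47, 80], 2)

def Spec_frequency_creteria (list : List Int) (num : Int) (out : List Int) : Prop :=
  out = frequency_creteria_alt list num
instance (list : List Int) (num : Int) (out : List Int) : Decidable (Spec_frequency_creteria list num out) := by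
  unfold Spec_frequency_creteria; infer_instance

-- ===== CLAIM (what is proved, stated in full; the proofs are below) =====
def Claim_equal_frequency_creteria : Prop := ∀ (list : List Int) (num : Int), Dom_frequency_creteria list num → Pre_frequency_creteria list num → Spec_frequency_creteria list num (frequency_creteria list num)

-- ===== LEMMAS AND PROOFS =====

-- count of elements < t, the quantity A's cascade distributes over the buckets
def pvCntLt (t : Int) (l : List Int) : Int := ((l.countP (fun e => decide (e < t))) : Int)

theorem pvCntLt_cons (t x : Int) (xs : List Int) :
    pvCntLt t (x :: xs) = (if x < t then 1 else 0) + pvCntLt t xs := by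
  unfold pvCntLt
  by_cases h : x < t <;> simp [List.countP_cons, h] <;> push_cast <;> omega

-- A's fold from an arbitrary accumulator, expressed through cumulative counts.
theorem pvInc_eval (a0 a1 a2 a3 a4 : Int) :
    (pvInc [a0, a1, a2, a3, a4] 0 = [a0 + 1, a1, a2, a3, a4]) ∧
    (pvInc [a0, a1, a2, a3, a4] 1 = [a0, a1 + 1, a2, a3, a4]) ∧
    (pvInc [a0, a1, a2, a3, a4] 2 = [a0, a1, a2 + 1, a3, a4]) ∧
    (pvInc [a0, a1, a2, a3, a4] 3 = [a0, a1, a2, a3 + 1, a4]) ∧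
    (pvInc [a0, a1, a2, a3, a4] 4 = [a0, a1, a2, a3, a4 + 1]) :=
  ⟨rfl, rfl, rfl, rfl, rfl⟩

theorem pv_fold_cnt (b d : Int) (hd : 0 < d) :
    ∀ (l : List Int) (a0 a1 a2 a3 a4 : Int),
      l.foldl (fun freq elem =>
          if elem < b + d then pvInc freq 0
          else if elem < b + 2 * d then pvInc freq 1
          else if elem < b + 3 * d then pvInc freq 2
          else if elem < b + 4 * d then pvInc freq 3
          else pvInc freq 4) [a0, a1, a2, a3, a4]
        = [a0 + pvCntLt (b + d) l,
           a1 + (pvCntLt (b + 2 * d) l - pvCntLt (b + d) l),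
           a2 + (pvCntLt (b + 3 * d) l - pvCntLt (b + 2 * d) l),
           a3 + (pvCntLt (b + 4 * d) l - pvCntLt (b + 3 * d) l),
           a4 + ((l.length : Int) - pvCntLt (b + 4 * d) l)] := by
    intro l
    induction l with
    | nil =>
        intro a0 a1 a2 a3 a4
        simp [pvCntLt]
    | cons x xs ih =>
        intro a0 a1 a2 a3 a4
        simp only [List.foldl_cons, pvCntLt_cons, List.length_cons]
        split_ifs with h1 h2 h3 h4 <;>
          simp only [pvInc_eval, ih] <;>
          (simp only [List.cons.injEq, and_true]; push_cast; (try split_ifs) <;> omega)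

theorem pv_delta_pos (num : Int) (hnum : 1 ≤ num) (hne : ¬ (1 : Int) = num) :
    0 < PySem.Int.floordiv (10 ^ num.toNat - 10 ^ (num - 1).toNat) 5 := by
  have hpow : (10 : Int) ^ num.toNat = 10 ^ (num - 1).toNat * 10 := by
    rw [← pow_succ]; congr 1; omega
  have hone : (1 : Int) ≤ 10 ^ (num - 1).toNat := one_le_pow₀ (by norm_num)
  have h5 : (1 : Int) * 5 ≤ 10 ^ num.toNat - 10 ^ (num - 1).toNat := by
    rw [hpow]; nlinarith
  have := (PySem.Int.le_floordiv_iff_mul_le (a := 10 ^ num.toNat - 10 ^ (num - 1).toNat)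
            (b := 5) (q := 1) (by norm_num)).2 h5
  omega

-- Binary-search invariant: on a monotone list, pvBelow returns a split point of the
-- predicate (· < t), provided [lo, hi) still contains the split point.
theorem pvBelow_inv (s : List Int) (t : Int)
    (hs : ∀ (i j : Nat) (hj : j < s.length) (hij : i ≤ j), s[i]'(by omega) ≤ s[j]) :
    ∀ (n : Nat) (lo hi : Int), (hi - lo).toNat ≤ n → 0 ≤ lo → lo ≤ hi → hi ≤ (s.length : Int) →
      (∀ (i : Nat) (h : i < s.length), (i : Int) < lo → s[i] < t) →
      (∀ (i : Nat) (h : i < s.length), hi ≤ (i : Int) → ¬ s[i] < t) →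
      0 ≤ pvBelow s t lo hi ∧ pvBelow s t lo hi ≤ (s.length : Int) ∧
      (∀ (i : Nat) (h : i < s.length), (i : Int) < pvBelow s t lo hi → s[i] < t) ∧
      (∀ (i : Nat) (h : i < s.length), pvBelow s t lo hi ≤ (i : Int) → ¬ s[i] < t) := by
  intro n
  induction n with
  | zero =>
      intro lo hi hfuel h0 hlh hhl hpre hpost
      have : ¬ lo < hi := by omega
      rw [pvBelow, dif_neg this]
      have hlohi : lo = hi := by omega
      exact ⟨h0, by omega, fun i h hi2 => hpre i h hi2, fun i h hi2 => hpost i h (by omega)⟩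
  | succ m ih =>
      intro lo hi hfuel h0 hlh hhl hpre hpost
      by_cases h : lo < hi
      · rw [pvBelow]
        simp only [dif_pos h]
        have hb := PySem.Int.floordiv_two_mid_bounds (le_of_lt h)
        have hlt : PySem.Int.floordiv (lo + hi) 2 < hi :=
          (PySem.Int.floordiv_lt_iff_lt_mul (by norm_num)).2 (by omega)
        set mid := PySem.Int.floordiv (lo + hi) 2 with hmid
        have hmid0 : 0 ≤ mid := by omega
        have hmidlen : mid < (s.length : Int) := by omega
        rw [PySem.List.pyGet?_of_nonneg (xs := s) hmid0,
            List.getElem?_eq_getElem (show mid.toNat < s.length by omega)]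
        simp only
        by_cases hv : s[mid.toNat]'(by omega) < t
        · rw [if_pos hv]
          refine ih (mid + 1) hi (by omega) (by omega) (by omega) hhl ?_ hpost
          intro i hilen hi2
          have : s[i] ≤ s[mid.toNat]'(by omega) := hs i mid.toNat (by omega) (by omega)
          omega
        · rw [if_neg hv]
          refine ih lo mid (by omega) h0 (by omega) (by omega) hpre ?_
          intro i hilen hi2
          have : s[mid.toNat]'(by omega) ≤ s[i] := hs mid.toNat i hilen (by omega)
          omega
      · rw [pvBelow, dif_neg h]
        have hlohi : lo = hi := by omega
        exact ⟨h0, by omega, fun i h2 hi2 => hpre i h2 hi2, fun i h2 hi2 => hpost i h2 (by omega)⟩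

-- A split point of a predicate equals its count.
theorem pv_countP_of_split (p : Int → Bool) :
    ∀ (s : List Int) (r : Nat), r ≤ s.length →
      (∀ (i : Nat) (h : i < s.length), i < r → p s[i]) →
      (∀ (i : Nat) (h : i < s.length), r ≤ i → ¬ p s[i]) →
      s.countP p = r := by
  intro s
  induction s with
  | nil => intro r hr _ _; simp at hr; simp [hr]
  | cons x xs ih =>
      intro r hr hpre hpost
      cases r with
      | zero =>
          have : ∀ e ∈ (x :: xs), ¬ p e := by
            intro e he
            obtain ⟨i, hi, rfl⟩ := List.getElem_of_mem he
            exact hpost i hi (by omega)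
          simp [List.countP_eq_zero.2 this]
      | succ r' =>
          have hx : p x := hpre 0 (by simp) (by omega)
          rw [List.countP_cons, ih r' (by simpa using hr)
                (fun i h hi2 => by simpa using hpre (i+1) (by simpa using h) (by omega))
                (fun i h hi2 => by simpa using hpost (i+1) (by simpa using h) (by omega))]
          simp [hx]

-- pvBelow over the sorted copy computes the count of elements < t of the original list.
theorem pvBelow_eq_cnt (list : List Int) (t : Int) :
    pvBelow (PySem.List.sorted list (fun x => x) false) t 0
        ((PySem.List.sorted list (fun x => x) false).length : Int) = pvCntLt t list := by
  set s := PySem.List.sorted list (fun x => x) false with hsdef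
  have hpw : s.Pairwise (· ≤ ·) := by
    simpa using PySem.List.sorted_pairwise (xs := list) (key := fun x => x)
  have hs : ∀ (i j : Nat) (hj : j < s.length) (hij : i ≤ j), s[i]'(by omega) ≤ s[j] := by
    intro i j hj hij
    rcases Nat.lt_or_ge i j with h | h
    · exact List.pairwise_iff_getElem.1 hpw i j (by omega) hj h
    · have : i = j := by omega
      subst this; rfl
  have hmain := pvBelow_inv s t hs ((s.length : Int) - 0).toNat 0 (s.length : Int)
      (le_refl _) (by omega) (by positivity) (le_refl _)
      (fun i h hi2 => by omega) (fun i h hi2 => by exact absurd hi2 (by push_cast; omega))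
  obtain ⟨h0, hlen, hpre, hpost⟩ := hmain
  have hcnt : s.countP (fun e => decide (e < t)) = (pvBelow s t 0 (s.length : Int)).toNat := by
    refine pv_countP_of_split _ s _ (by omega) ?_ ?_
    · intro i h hi2
      simpa using hpre i h (by omega)
    · intro i h hi2
      simpa using hpost i h (by omega)
  have hperm : List.Perm s list := PySem.List.sorted_perm (xs := list) (key := fun x => x) (rev := false)
  unfold pvCntLt
  rw [← hperm.countP_eq, hcnt]
  omega

-- ===== VERDICT (by name: the statement is the Claim_ definition above) =====
theorem frequency_creteria_spec : Claim_equal_frequency_creteria := by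
  intro list num _ hpre
  unfold Spec_frequency_creteria frequency_creteria frequency_creteria_alt
  by_cases h : (1 : Int) = num
  · simp only [if_pos h]
    rw [pv_fold_cnt 0 2 (by norm_num) list]
    simp only [pvBelow_eq_cnt, zero_add]
  · simp only [if_neg h]
    rw [pv_fold_cnt _ _ (pv_delta_pos num hpre h) list]
    simp only [pvBelow_eq_cnt, zero_add]
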